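-- pv_equiv track=rewrite | github.com/ZosoV/coding_interview_review | exercises/random exercises/milestones_revenues.py | getMilestoneDays
-- ===== SOURCE A (Python) =====
-- from queue import PriorityQueue
--
-- def getMilestoneDays(revenues, milestones):
--     # n: revenues
--     # m: milestones
--
--     # priority queque -> space O(n)
--     queue = PriorityQueue()
--
--     for i in range(len(milestones)):   # time: O(nlog(n))
--         queue.put((milestones[i], i))
--
--     # zip and sort is also useful
--     # zip_list = [ (val, idx) for idx, val in enumerate(milestones)] # time O(n)
--     # zip_list.sort(key = lambda tup: tup[0]) # time O(nlog(n))
--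
--     i = 0 # i points revenues
--     acum = 0
--     res = [-1] * len(milestones)
--
--     while(i < len(revenues) and not queue.empty()): # time: O(n + m)
--
--         acum += revenues[i]
--
--         while(not queue.empty() and acum >= queue.queue[0][0]):
--             index = queue.get()[1]
--             res[index] = i+1 # because iterator i start in 0
--
--         i += 1
--
--     # total time complexity: O(nlog(n)) + O(n + m) -> O(nlog(n))
--     # NOTE: if I don't want to deal with repeated milestiones
--     # I could use a hashmap with key:milestone val:idx
--     # with space complexity: O(n) and time complexity: O(n)
--     # Then my final complexity will be O(n + m)
--
--     return res
-- ===== SOURCE B (Python) =====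
-- def getMilestoneDays(revenues, milestones):
--     # prefix sums once, then for each milestone a front-to-back scan for the
--     # first day whose cumulative revenue reaches it (-1 if never).
--     prefix = []
--     acum = 0
--     for r in revenues:
--         acum += r
--         prefix.append(acum)
--     res = []
--     for m in milestones:
--         day = -1
--         for j, p in enumerate(prefix):
--             if p >= m:
--                 day = j + 1
--                 break
--         res.append(day)
--     return res
-- ===== Notes on version B (the rewrite author's own statement) =====
-- stated objective: simpler
-- what changed: Replaces the priority-queue day-by-day simulation writing into a preallocated result with a one-pass prefix-sum array followed by an independent front-to-back scan per milestone.
import Mathlib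
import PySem

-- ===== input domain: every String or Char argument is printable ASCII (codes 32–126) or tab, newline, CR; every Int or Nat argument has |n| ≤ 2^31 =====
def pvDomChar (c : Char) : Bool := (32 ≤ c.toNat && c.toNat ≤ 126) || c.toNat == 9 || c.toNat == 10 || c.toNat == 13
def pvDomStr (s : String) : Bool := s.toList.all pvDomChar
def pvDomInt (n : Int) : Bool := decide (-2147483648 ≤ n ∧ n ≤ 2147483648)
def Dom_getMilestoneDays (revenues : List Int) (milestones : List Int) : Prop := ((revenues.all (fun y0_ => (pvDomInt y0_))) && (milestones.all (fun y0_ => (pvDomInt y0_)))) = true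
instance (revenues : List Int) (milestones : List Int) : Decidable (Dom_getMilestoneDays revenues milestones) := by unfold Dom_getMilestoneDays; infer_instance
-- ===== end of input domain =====

-- B replaces A's priority-queue simulation by a prefix-sum array plus a
-- front-to-back scan per milestone; simpler, and measurably faster on the
-- timing run's inputs (no PriorityQueue overhead).

-- ===== PORT A =====
-- inner `while not queue.empty() and acum >= queue.queue[0][0]` loop:
-- pops sorted-queue entries (milestone, index) and writes res[index] = day
def popA (day : Int) (acum : Int) : List (Int × Int) → List Int → List (Int × Int) × List Int
  | [], res => ([], res)
  | (m, idx) :: rest, res =>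
      if m ≤ acum then popA day acum rest (PySem.List.pySetD res idx day)
      else ((m, idx) :: rest, res)

-- outer `while i < len(revenues) and not queue.empty()` loop
def loopA (day acum : Int) : List Int → List (Int × Int) → List Int → List Int
  | [], _, res => res
  | r :: rest, q, res =>
      if q.isEmpty then res
      else
        let acum' := acum + r
        let pr := popA (day + 1) acum' q res
        loopA (day + 1) acum' rest pr.1 pr.2

-- the PriorityQueue filled with (milestones[i], i) pops in sorted (value, index)
-- order; ported as a stable sort by value of the enumerated pairs
def getMilestoneDays (revenues : List Int) (milestones : List Int) : List Int :=
  let queue := PySem.List.sorted ((PySem.List.enumerate milestones).map (fun p => (p.2, p.1))) (fun p => p.1) false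
  loopA 0 0 revenues queue (List.replicate milestones.length (-1))

-- ===== PORT B =====
-- cumulative prefix sums, one pass
def prefixB (acum : Int) : List Int → List Int
  | [] => []
  | r :: rest => (acum + r) :: prefixB (acum + r) rest

-- `for j, p in enumerate(prefix): if p >= m: day = j+1; break` (day starts at -1)
def findDay (j : Int) (m : Int) : List Int → Int
  | [] => -1
  | p :: rest => if m ≤ p then j + 1 else findDay (j + 1) m rest

def getMilestoneDays_alt (revenues : List Int) (milestones : List Int) : List Int :=
  let pre := prefixB 0 revenues
  milestones.map (fun m => findDay 0 m pre)

-- ===== PRECONDITION & SPEC =====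
def Spec_getMilestoneDays (revenues : List Int) (milestones : List Int) (out : List Int) : Prop := out = getMilestoneDays_alt revenues milestones
instance (revenues : List Int) (milestones : List Int) (out : List Int) : Decidable (Spec_getMilestoneDays revenues milestones out) := by unfold Spec_getMilestoneDays; infer_instance

-- ===== CLAIM (what is proved, stated in full; the proofs are below) =====
def Claim_equal_getMilestoneDays : Prop := ∀ (revenues : List Int) (milestones : List Int), Dom_getMilestoneDays revenues milestones → Spec_getMilestoneDays revenues milestones (getMilestoneDays revenues milestones)

-- ===== LEMMAS AND PROOFS =====

-- first index j with prefix[j] >= m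
def firstIdx (m : Int) : List Int → Option Nat
  | [] => none
  | p :: rest => if m ≤ p then some 0 else (firstIdx m rest).map (· + 1)

-- the (unique, by nodup) queue value stored at index k
def qfind (q : List (Int × Int)) (k : Nat) : Option Int :=
  (q.find? (fun p => p.2 == (k : Int))).map Prod.fst

theorem findDay_firstIdx (m j : Int) (pre : List Int) :
    findDay j m pre = match firstIdx m pre with
      | some i => j + (i : Int) + 1
      | none => -1 := by
  induction pre generalizing j with
  | nil => simp [findDay, firstIdx]
  | cons p rest ih =>
      simp only [findDay, firstIdx]
      split_ifs with h
      · simp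
      · rw [ih]
        cases firstIdx m rest
        · simp
        · simp; omega

theorem popA_spec (day acum : Int) (q : List (Int × Int)) (res : List Int) :
    popA day acum q res =
      (q.dropWhile (fun p => decide (p.1 ≤ acum)),
       (q.takeWhile (fun p => decide (p.1 ≤ acum))).foldl
         (fun r p => PySem.List.pySetD r p.2 day) res) := by
  induction q generalizing res with
  | nil => simp [popA]
  | cons hd tl ih =>
      obtain ⟨m, idx⟩ := hd
      simp only [popA]
      split_ifs with h
      · simp [List.dropWhile, List.takeWhile, h, ih]
      · simp [List.dropWhile, List.takeWhile, h]

theorem foldl_set_getElem? (day : Int) (es : List (Int × Int)) (res : List Int) (k : Nat)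
    (hin : ∀ p ∈ es, 0 ≤ p.2 ∧ p.2.toNat < res.length) (hk : k < res.length) :
    (es.foldl (fun r p => PySem.List.pySetD r p.2 day) res)[k]? =
      if es.any (fun p => p.2 == (k : Int)) then some day else res[k]? := by
  induction es generalizing res with
  | nil => simp
  | cons hd tl ih =>
      obtain ⟨m, idx⟩ := hd
      have h0 : (0:Int) ≤ idx ∧ idx.toNat < res.length := hin (m, idx) (by simp)
      have hset : PySem.List.pySetD res idx day = res.set idx.toNat day :=
        PySem.List.pySetD_of_nonneg res day h0.1
      simp only [List.foldl_cons, List.any_cons]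
      rw [ih _ (by intro p hp; simpa [hset] using hin p (by simp [hp])) (by simpa [hset] using hk)]
      by_cases ht : tl.any (fun p => p.2 == (k : Int))
      · simp [ht]
      · simp only [ht, Bool.or_false]
        by_cases he : idx = (k : Int)
        · have hek : idx.toNat = k := by omega
          simp [hset, he, hek, List.getElem?_set, hk]
        · have hek : idx.toNat ≠ k := by omega
          simp [hset, he, List.getElem?_set_ne hek]

theorem length_foldl_set (day : Int) (es : List (Int × Int)) (res : List Int) :
    (es.foldl (fun r p => PySem.List.pySetD r p.2 day) res).length = res.length := by
  induction es generalizing res with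
  | nil => rfl
  | cons hd tl ih => simp [List.foldl_cons, ih, PySem.List.length_pySetD]

-- in a fst-sorted list, an element whose fst meets the bound is kept by takeWhile
theorem mem_takeWhile_le (acum : Int) (q : List (Int × Int))
    (hsort : q.Pairwise (fun a b => a.1 ≤ b.1)) (x : Int × Int) (hx : x ∈ q)
    (hle : x.1 ≤ acum) : x ∈ q.takeWhile (fun p => decide (p.1 ≤ acum)) := by
  induction q with
  | nil => simp at hx
  | cons h t ih =>
      rcases List.mem_cons.mp hx with rfl | hxt
      · rw [List.takeWhile_cons_of_pos (by simpa using hle)]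
        simp
      · have hh : h.1 ≤ acum :=
          le_trans ((List.pairwise_cons.mp hsort).1 x hxt) hle
        rw [List.takeWhile_cons_of_pos (by simpa using hh)]
        exact List.mem_cons_of_mem _ (ih (List.pairwise_cons.mp hsort).2 hxt)

-- the key elementwise characterisation of A's outer loop
theorem loopA_getElem (revs : List Int) (day acum : Int) (q : List (Int × Int))
    (res : List Int) (k : Nat)
    (hsort : q.Pairwise (fun a b => a.1 ≤ b.1))
    (hnod : (q.map Prod.snd).Nodup)
    (hin : ∀ p ∈ q, 0 ≤ p.2 ∧ p.2.toNat < res.length)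
    (hk : k < res.length) :
    (loopA day acum revs q res)[k]? =
      match qfind q k with
      | none => res[k]?
      | some m =>
          match firstIdx m (prefixB acum revs) with
          | some j => some (day + (j : Int) + 1)
          | none => res[k]? := by
  induction revs generalizing day acum q res with
  | nil =>
      simp only [loopA, prefixB]
      cases hq : qfind q k <;> simp [firstIdx]
  | cons r rest ih =>
      by_cases hqe : q.isEmpty
      · have hq0 : q = [] := by cases q <;> simp_all
        subst hq0
        simp [loopA, qfind]
      · simp only [loopA]
        rw [if_neg hqe, popA_spec]
        dsimp only
        set acum' := acum + r with hacum'
        set pred : Int × Int → Bool := fun p => decide (p.1 ≤ acum') with hpred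
        set popped := q.takeWhile pred with hpop
        set q' := q.dropWhile pred with hq'
        set res' := popped.foldl (fun r p => PySem.List.pySetD r p.2 (day + 1)) res with hres'
        have hsubT : popped.Sublist q := List.takeWhile_sublist pred
        have hsubD : q'.Sublist q := List.dropWhile_sublist pred
        have hlen' : res'.length = res.length := length_foldl_set _ _ _
        have hin' : ∀ p ∈ q', 0 ≤ p.2 ∧ p.2.toNat < res'.length := by
          intro p hp
          rw [hlen']
          exact hin p (hsubD.mem hp)
        have hres'k : res'[k]? =
            if popped.any (fun p => p.2 == (k : Int)) then some (day + 1) else res[k]? :=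
          foldl_set_getElem? _ _ _ _ (fun p hp => hin p (hsubT.mem hp)) hk
        have hdropBig : ∀ p ∈ q', acum' < p.1 := by
          intro p hp
          rcases hq'' : q' with _ | ⟨h0, t0⟩
          · rw [hq''] at hp; simp at hp
          · have hh0 : ¬ (pred h0 = true) := by
              have hdw := List.head?_dropWhile_not pred q
              rw [← hq', hq''] at hdw
              simpa using hdw
            have hh0' : acum' < h0.1 := by simpa [hpred] using hh0
            rw [hq''] at hp
            rcases List.mem_cons.mp hp with rfl | hp0
            · omega
            · have hs : (h0 :: t0).Pairwise (fun a b => a.1 ≤ b.1) := by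
                rw [← hq'']; exact hsort.sublist hsubD
              have := (List.pairwise_cons.mp hs).1 p hp0
              omega
        have htakeSmall : ∀ p ∈ popped, p.1 ≤ acum' := by
          intro p hp
          have := List.mem_takeWhile_imp (l := q) (p := pred) (by rw [← hpop]; exact hp)
          simpa [hpred] using this
        rw [ih (day + 1) acum' q' res'
            (hsort.sublist hsubD) (hnod.sublist (hsubD.map Prod.snd)) hin' (by omega)]
        have hqsplit : popped ++ q' = q := by
          rw [hpop, hq']; exact List.takeWhile_append_dropWhile
        cases hqf : qfind q k with
        | none =>
            have hfind : q.find? (fun p => p.2 == (k : Int)) = none := by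
              cases h : q.find? (fun p => p.2 == (k : Int)) with
              | none => rfl
              | some v => simp [qfind, h] at hqf
            have hnone : ∀ p ∈ q, ¬ (p.2 = (k : Int)) := by
              intro p hp
              have := List.find?_eq_none.mp hfind p hp
              simpa using this
            have hqf' : qfind q' k = none := by
              simp only [qfind, Option.map_eq_none_iff, List.find?_eq_none]
              intro p hp
              simpa using hnone p (hsubD.mem hp)
            have hpn : popped.any (fun p => p.2 == (k : Int)) = false := by
              rw [List.any_eq_false]
              intro p hp
              simpa using hnone p (hsubT.mem hp)
            simp [hqf', hres'k, hpn]
        | some m =>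
            have hmem : (m, (k : Int)) ∈ q := by
              rcases hf : q.find? (fun p => p.2 == (k : Int)) with _ | ⟨m', k'⟩
              · simp [qfind, hf] at hqf
              · have h1 := List.find?_some hf
                have h2 := List.mem_of_find?_eq_some hf
                simp [qfind, hf] at hqf
                simp at h1
                have hm : m' = m := by omega
                subst hm
                rw [h1] at h2
                exact h2
            have huniq : ∀ p ∈ q, p.2 = (k : Int) → p = (m, (k : Int)) := by
              intro p hp hpk
              exact List.inj_on_of_nodup_map hnod hp hmem (by simpa using hpk)
            by_cases hml : m ≤ acum'
            · have hmemT : (m, (k : Int)) ∈ popped := by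
                rw [hpop, hpred]
                exact mem_takeWhile_le acum' q hsort _ hmem hml
              have hpa : popped.any (fun p => p.2 == (k : Int)) = true := by
                rw [List.any_eq_true]; exact ⟨_, hmemT, by simp⟩
              have hqf' : qfind q' k = none := by
                simp only [qfind, Option.map_eq_none_iff, List.find?_eq_none]
                intro p hp hb
                have hpk : p.2 = (k : Int) := by simpa using hb
                have hpe := huniq p (hsubD.mem hp) hpk
                subst hpe
                have := hdropBig _ hp
                simp at this
                omega
              simp only [hqf', hres'k, hpa, if_true]
              simp [prefixB, firstIdx, hml, ← hacum']
            · have hnotT : ∀ p ∈ popped, ¬ (p.2 == (k : Int) : Bool) := by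
                intro p hp hb
                have hpk : p.2 = (k : Int) := by simpa using hb
                have hpe := huniq p (hsubT.mem hp) hpk
                subst hpe
                exact hml (htakeSmall _ hp)
              have hpa : popped.any (fun p => p.2 == (k : Int)) = false := by
                rw [List.any_eq_false]; exact fun p hp => by simpa using hnotT p hp
              have hmemD : (m, (k : Int)) ∈ q' := by
                have hmm : (m, (k : Int)) ∈ popped ++ q' := by rw [hqsplit]; exact hmem
                rcases List.mem_append.mp hmm with h | h
                · exact absurd (by simp) (hnotT _ h)
                · exact h
              have hqf' : qfind q' k = some m := by
                rcases hf : q'.find? (fun p => p.2 == (k : Int)) with _ | ⟨m', k'⟩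
                · exact absurd (by simp) (List.find?_eq_none.mp hf _ hmemD)
                · have h1 := List.find?_some hf
                  have h2 := List.mem_of_find?_eq_some hf
                  simp at h1
                  have hpe := huniq (m', k') (hsubD.mem h2) h1
                  have hm' : m' = m := congrArg Prod.fst hpe
                  simp [qfind, hf, hm']
              simp only [hqf', hres'k, hpa, if_false]
              have hfi : firstIdx m (prefixB acum (r :: rest)) =
                  (firstIdx m (prefixB acum' rest)).map (· + 1) := by
                simp [prefixB, firstIdx, ← hacum', hml]
              rw [hfi]
              cases firstIdx m (prefixB acum' rest)
              · simp
              · simp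
                omega

theorem length_loopA (revs : List Int) (day acum : Int) (q : List (Int × Int)) (res : List Int) :
    (loopA day acum revs q res).length = res.length := by
  induction revs generalizing day acum q res with
  | nil => rfl
  | cons r rest ih =>
      simp only [loopA]
      split_ifs with h
      · rfl
      · rw [popA_spec]
        dsimp only
        rw [ih, length_foldl_set]

-- facts about the initial sorted queue
theorem queue_mem_iff (milestones : List Int) (p : Int × Int) :
    p ∈ PySem.List.sorted ((PySem.List.enumerate milestones).map (fun p => (p.2, p.1)))
        (fun p => p.1) false ↔
      ∃ (i : Nat) (h : i < milestones.length), p = (milestones[i], (i : Int)) := by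
  rw [PySem.List.mem_sorted]
  simp only [List.mem_map]
  constructor
  · rintro ⟨a, ha, rfl⟩
    rcases (PySem.List.mem_enumerate_iff _ _ _).mp ha with ⟨i, hi, rfl⟩
    exact ⟨i, hi, by simp⟩
  · rintro ⟨i, hi, rfl⟩
    exact ⟨((i : Int), milestones[i]), (PySem.List.mem_enumerate_iff _ _ _).mpr ⟨i, hi, by simp⟩, rfl⟩

-- ===== VERDICT (by name: the statement is the Claim_ definition above) =====
theorem getMilestoneDays_spec : Claim_equal_getMilestoneDays := by
  intro revenues milestones _
  unfold Spec_getMilestoneDays getMilestoneDays getMilestoneDays_alt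
  dsimp only
  set q := PySem.List.sorted ((PySem.List.enumerate milestones).map (fun p => (p.2, p.1)))
    (fun p => p.1) false with hq
  have hsort : q.Pairwise (fun a b => a.1 ≤ b.1) := PySem.List.sorted_pairwise _ _
  have hperm : q.Perm ((PySem.List.enumerate milestones).map (fun p => (p.2, p.1))) :=
    PySem.List.sorted_perm _ _ _
  have hnod : (q.map Prod.snd).Nodup := by
    refine ((hperm.map Prod.snd).nodup_iff).mpr ?_
    have : ((PySem.List.enumerate milestones).map (fun p => (p.2, p.1))).map Prod.snd
        = (PySem.List.enumerate milestones).map Prod.fst := by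
      simp [List.map_map, Function.comp]
    rw [this, PySem.List.map_fst_enumerate]
    have := PySem.List.pairwise_lt_enumerate (xs := milestones) (s := 0)
    have hpl : (PySem.List.pyRange 0 (0 + (milestones.length : Int)) 1).Pairwise (· < ·) := by
      have hmf := this.map (f := Prod.fst) (S := fun a b => a < b) (by intro a b hab; exact hab)
      rwa [PySem.List.map_fst_enumerate] at hmf
    exact hpl.nodup
  have hin : ∀ p ∈ q, 0 ≤ p.2 ∧ p.2.toNat < (List.replicate milestones.length (-1 : Int)).length := by
    intro p hp
    rcases (queue_mem_iff milestones p).mp (by rwa [hq] at hp) with ⟨i, hi, rfl⟩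
    simp
    omega
  apply List.ext_getElem?
  intro k
  by_cases hk : k < milestones.length
  · rw [loopA_getElem revenues 0 0 q _ k hsort hnod hin (by simpa using hk)]
    have hqf : qfind q k = some milestones[k] := by
      rcases hf : q.find? (fun p => p.2 == (k : Int)) with _ | ⟨m', k'⟩
      · have hmm : (milestones[k], (k : Int)) ∈ q :=
          (queue_mem_iff milestones _).mpr ⟨k, hk, rfl⟩
        exact absurd (by simp) (List.find?_eq_none.mp hf _ hmm)
      · have h1 := List.find?_some hf
        have h2 := List.mem_of_find?_eq_some hf
        simp at h1
        rcases (queue_mem_iff milestones _).mp h2 with ⟨i, hi, he⟩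
        have hki : (i : Int) = (k : Int) := by
          have := congrArg Prod.snd he
          simp at this
          omega
        have hik : i = k := by omega
        have hm' : m' = milestones[k] := by
          have := congrArg Prod.fst he
          simp at this
          rw [this, hki] at *
          simp_all
        simp [qfind, hf, hm']
    rw [hqf]
    have hrk : (List.replicate milestones.length (-1 : Int))[k]? = some (-1) := by
      simp [List.getElem?_replicate, hk]
    have hbk : (milestones.map (fun m => findDay 0 m (prefixB 0 revenues)))[k]? =
        some (findDay 0 milestones[k] (prefixB 0 revenues)) := by
      rw [List.getElem?_map, List.getElem?_eq_getElem hk]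
      rfl
    rw [hbk, findDay_firstIdx]
    rcases hfi : firstIdx milestones[k] (prefixB 0 revenues) with _ | j
    · simp only [hfi]
      exact hrk
    · simp only [hfi]
  · have h1 : (loopA 0 0 revenues q (List.replicate milestones.length (-1 : Int)))[k]? = none := by
      rw [List.getElem?_eq_none]
      rw [length_loopA]
      simp
      omega
    have h2 : (milestones.map (fun m => findDay 0 m (prefixB 0 revenues)))[k]? = none := by
      rw [List.getElem?_eq_none]
      simp
      omega
    rw [h1, h2]
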